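-- pv_equiv track=rewrite | github.com/M3G4THEKING/pogotracker | functions.py | parametri
-- ===== SOURCE A (Python) =====
-- def parametri(text):
-- 	command = text.split()
-- 	inizio = len(command[0])+1
-- 	parametri = []
-- 	parametro = ""
-- 	#Divide i parametri sfruttando i due punti
-- 	for i in range(inizio, len(text)):
-- 		if text[i] != ":":
-- 			#if not (parametro == "" and text[i] == " "):
-- 			parametro = parametro + text[i]
-- 		else:
-- 			simbolo = False
-- 			rimossi = 0
-- 			for j in range(0, len(parametro)):
-- 				if parametro[j] != " ":
-- 					simbolo = True
-- 				if parametro[j] == " " and (not simbolo):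
-- 					rimossi += 1
-- 			parametri.append(parametro[rimossi:])
-- 			parametro = ""
-- 	if len(parametro) > 0:
-- 		simbolo = False
-- 		rimossi = 0
-- 		for j in range(0, len(parametro)):
-- 			if parametro[j] != " ":
-- 				simbolo = True
-- 			if parametro[j] == " " and (not simbolo):
-- 				rimossi += 1
-- 		parametri.append(parametro[rimossi:])
-- 	#parametri_completi = []
-- 	#Ridefinisco un array con coppie di parametro e numero
-- 	#parametro = ""
-- 	#for i in range(0, len(parametri)):
-- 	#	numero = 1
-- 	#	if ":" in parametri[i]:
-- 	#		numeroTrovato = False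
-- 	#		for j in range(0, len(parametri[i])):
-- 	#			if not numeroTrovato:
-- 	#				if parametri[i][j] != ":":
-- 	#					parametro = parametro + parametri[i][j]
-- 	#				else:
-- 	#					parametri.append(parametro)
-- 	#					try:
-- 	#						numero = int(parametri[i][j+1:])
-- 	#						if numero < 1:
-- 	#							numero = 1
-- 	#					except:
-- 	#						numero = 1
-- 	#					numeroTrovato = True
-- 	#		parametri_completi.append([parametro, numero])
-- 	#	else:
-- 	#		parametri_completi.append([parametri[i], numero])
-- 	#	parametro = ""
-- 	return parametri
-- ===== SOURCE B (Python) =====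
-- def parametri(text):
--     inizio = len(text.split()[0]) + 1
--     raw = text[inizio:].split(':')
--     if raw and raw[-1] == '':
--         raw = raw[:-1]
--     return [p.lstrip(' ') for p in raw]
-- ===== Notes on version B (the rewrite author's own statement) =====
-- stated objective: simpler
-- what changed: Replaces A's character-by-character colon scan with a manual leading-space counting loop by one library split on the colon character (dropping one trailing empty piece) and a space-lstrip comprehension.
import Mathlib
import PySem

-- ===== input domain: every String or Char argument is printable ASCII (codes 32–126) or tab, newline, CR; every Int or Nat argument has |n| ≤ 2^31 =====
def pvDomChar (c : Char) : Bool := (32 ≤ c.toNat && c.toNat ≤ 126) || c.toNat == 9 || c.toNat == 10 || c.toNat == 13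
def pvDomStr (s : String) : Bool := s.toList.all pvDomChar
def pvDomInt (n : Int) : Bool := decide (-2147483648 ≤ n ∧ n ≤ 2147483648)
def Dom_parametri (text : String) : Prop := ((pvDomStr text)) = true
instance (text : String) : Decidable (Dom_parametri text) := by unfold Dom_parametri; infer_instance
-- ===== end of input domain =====

-- B replaces A's char-by-char colon scan and manual leading-space counting with one split(':') plus a lstrip comprehension (simpler).

-- ===== PORT A =====
-- inner loop 'for j in range(0, len(parametro)): …' counting removable leading spaces
def pvStripStep (st : Bool × Nat) (c : Char) : Bool × Nat :=
  let simbolo := st.1 || (c != ' ')       -- 'if parametro[j] != " ": simbolo = True'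
  (simbolo, if c == ' ' && !simbolo then st.2 + 1 else st.2)

def pvStripCount (p : List Char) : Nat :=
  (p.foldl pvStripStep (false, 0)).2

-- body of 'for i in range(inizio, len(text))'
def pvStepA (st : List String × List Char) (c : Char) : List String × List Char :=
  if c != ':' then (st.1, st.2 ++ [c])
  else (st.1 ++ [String.ofList (PySem.Chars.slice st.2 (some ((pvStripCount st.2 : Int))) none)], [])

def parametri (text : String) : List String :=
  let t := text.toList
  let command := PySem.Chars.split₀ t
  let inizio : Int := ((PySem.List.pyGetD command 0 []).length : Int) + 1
  let st := (PySem.List.pyRange inizio (PySem.Chars.len t) 1).foldl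
      (fun st i => pvStepA st (PySem.List.pyGetD t i ' ')) ([], [])
  if st.2.length > 0 then
    st.1 ++ [String.ofList (PySem.Chars.slice st.2 (some ((pvStripCount st.2 : Int))) none)]
  else st.1

-- ===== PORT B =====
def parametri_alt (text : String) : List String :=
  let t := text.toList
  let inizio : Int := (((PySem.Chars.split₀ t).headD []).length : Int) + 1
  let raw := PySem.Chars.splitOn (PySem.Chars.slice t (some inizio) none) [':']
  let raw' := match raw.getLast? with
    | some [] => raw.dropLast   -- 'if raw and raw[-1] == "": raw = raw[:-1]'
    | _ => raw
  -- p.lstrip(' ') strips only space characters: exactly List.dropWhile (· == ' ')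
  raw'.map (fun p => String.ofList (p.dropWhile (· == ' ')))

-- ===== PRECONDITION & SPEC =====
-- Pre_ excludes exactly the texts with no non-whitespace character, where indexing the first
-- whitespace-split word raises IndexError in both A and B.
def Pre_parametri (text : String) : Prop := PySem.Chars.split₀ text.toList ≠ []
instance (text : String) : Decidable (Pre_parametri text) := by unfold Pre_parametri; infer_instance
def pvWitness_parametri : String := "cmd  a : b:"

def Spec_parametri (text : String) (out : List String) : Prop := out = parametri_alt text
instance (text : String) (out : List String) : Decidable (Spec_parametri text out) := by unfold Spec_parametri; infer_instance

-- ===== CLAIM (what is proved, stated in full; the proofs are below) =====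
def Claim_equal_parametri : Prop := ∀ (text : String), Dom_parametri text → Pre_parametri text → Spec_parametri text (parametri text)

-- ===== LEMMAS AND PROOFS =====

-- reference splitter: text.split(':') written structurally
def pvMySplit : List Char → List (List Char)
  | [] => [[]]
  | c :: cs => if c = ':' then [] :: pvMySplit cs else (pvMySplit cs).modifyHead (c :: ·)

lemma pvMySplit_ne_nil (l : List Char) : pvMySplit l ≠ [] := by
  cases l with
  | nil => simp [pvMySplit]
  | cons c cs =>
    simp only [pvMySplit]
    split_ifs <;> simp [List.modifyHead]
    cases h : pvMySplit cs with
    | nil => exact absurd h (pvMySplit_ne_nil cs)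
    | cons a t => simp

lemma pvModifyHead_nil (l : List (List Char)) :
    List.modifyHead (fun x => ([] : List Char) ++ x) l = l := by
  cases l <;> simp

lemma pvModifyHead_id (l : List (List Char)) :
    List.modifyHead (fun x => x) l = l := by
  cases l <;> simp

lemma splitOn_go_eq (l : List Char) : ∀ (fuel : Nat) (cur : List Char) (acc : List (List Char)),
    l.length ≤ fuel →
    PySem.Chars.splitOn.go [':'] fuel l cur acc
      = acc.reverse ++ (pvMySplit l).modifyHead (cur.reverse ++ ·) := by
  induction l with
  | nil =>
    intro fuel cur acc _
    cases fuel <;> simp [PySem.Chars.splitOn.go, pvMySplit]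
  | cons c cs ih =>
    intro fuel cur acc h
    cases fuel with
    | zero => simp at h
    | succ f =>
      simp only [List.length_cons, Nat.add_le_add_iff_right] at h
      by_cases hc : c = ':'
      · subst hc
        simp only [PySem.Chars.splitOn.go, List.isPrefixOf, Bool.and_true, beq_self_eq_true,
          if_pos, List.length_cons, List.length_nil, List.drop_succ_cons, List.drop_zero]
        rw [ih f [] (cur.reverse :: acc) h]
        simp [pvMySplit, pvModifyHead_id]
      · have hpre : List.isPrefixOf [':'] (c :: cs) = false := by
          simp [List.isPrefixOf]; exact fun h' => absurd h'.symm hc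
        simp only [PySem.Chars.splitOn.go, hpre, Bool.false_eq_true, if_neg, not_false_iff]
        rw [ih f (c :: cur) acc h]
        have hne := pvMySplit_ne_nil cs
        cases hms : pvMySplit cs with
        | nil => exact absurd hms hne
        | cons a t => simp [pvMySplit, hc, hms, List.modifyHead]

lemma splitOn_eq_pvMySplit (l : List Char) :
    PySem.Chars.splitOn l [':'] = pvMySplit l := by
  have := splitOn_go_eq l (l.length + 1) [] [] (by omega)
  simp only [List.reverse_nil, List.nil_append] at this
  rw [pvModifyHead_id] at this
  simpa [PySem.Chars.splitOn] using this

-- A's leading-space counter counts the leading run of spaces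
lemma pvStripCount_fold_true (p : List Char) : ∀ r : Nat,
    (p.foldl pvStripStep (true, r)).2 = r := by
  induction p with
  | nil => intro r; rfl
  | cons c cs ih =>
    intro r
    have hstep : pvStripStep (true, r) c = (true, r) := by simp [pvStripStep]
    rw [List.foldl_cons, hstep]
    exact ih r

lemma pvStripCount_fold_false (p : List Char) : ∀ r : Nat,
    (p.foldl pvStripStep (false, r)).2 = r + (p.takeWhile (· == ' ')).length := by
  induction p with
  | nil => intro r; simp
  | cons c cs ih =>
    intro r
    by_cases hc : c = ' '
    · subst hc
      have hstep : pvStripStep (false, r) ' ' = (false, r + 1) := by simp [pvStripStep]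
      rw [List.foldl_cons, hstep, ih (r + 1)]
      simp [List.takeWhile]
      omega
    · have hstep : pvStripStep (false, r) c = (true, r) := by simp [pvStripStep, hc]
      rw [List.foldl_cons, hstep, pvStripCount_fold_true cs r]
      have hcb : (c == ' ') = false := by simp [hc]
      simp [List.takeWhile, hcb]

lemma pvStripCount_eq (p : List Char) :
    pvStripCount p = (p.takeWhile (· == ' ')).length := by
  unfold pvStripCount
  have := pvStripCount_fold_false p 0
  simpa using this

lemma drop_takeWhile_length {α : Type} (p : α → Bool) (l : List α) :
    l.drop (l.takeWhile p).length = l.dropWhile p := by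
  induction l with
  | nil => rfl
  | cons c cs ih =>
    by_cases hc : p c
    · simp [List.takeWhile, List.dropWhile, hc, ih]
    · simp [List.takeWhile, List.dropWhile, hc]

-- A's stripped segment = lstrip(' ')
lemma stripA_eq (p : List Char) :
    String.ofList (PySem.Chars.slice p (some ((pvStripCount p : Int))) none) =
      String.ofList (p.dropWhile (· == ' ')) := by
  have h0 : (0 : Int) ≤ (pvStripCount p : Int) := by positivity
  simp only [PySem.Chars.slice_eq_listSlice, PySem.List.slice_from p h0, Int.toNat_natCast]
  rw [pvStripCount_eq, drop_takeWhile_length]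

-- recursive characterisation of A's main loop + final append
def pvSegs (p : List Char) : List Char → List String
  | [] => if p.length > 0 then [String.ofList (p.dropWhile (· == ' '))] else []
  | c :: cs => if c = ':' then String.ofList (p.dropWhile (· == ' ')) :: pvSegs [] cs
               else pvSegs (p ++ [c]) cs

lemma foldA_eq (s : List Char) : ∀ (ps : List String) (p : List Char),
    (let st := s.foldl pvStepA (ps, p)
     if st.2.length > 0 then
       st.1 ++ [String.ofList (PySem.Chars.slice st.2 (some ((pvStripCount st.2 : Int))) none)]
     else st.1) = ps ++ pvSegs p s := by
  induction s with
  | nil =>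
    intro ps p
    simp only [List.foldl_nil, pvSegs]
    split_ifs with h
    · rw [stripA_eq]
    · simp
  | cons c cs ih =>
    intro ps p
    by_cases hc : c = ':'
    · subst hc
      simp only [List.foldl_cons, pvStepA, bne_self_eq_false, Bool.false_eq_true, if_neg,
        not_false_iff, pvSegs, if_pos]
      rw [ih (ps ++ [String.ofList (PySem.Chars.slice p (some ((pvStripCount p : Int))) none)]) []]
      rw [stripA_eq]
      simp
    · have hb : (c != ':') = true := by simp [hc]
      simp only [List.foldl_cons, pvStepA, hb, if_pos, pvSegs, if_neg hc]
      exact ih ps (p ++ [c])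

-- B's trailing-drop
def pvAdjust (l : List (List Char)) : List (List Char) :=
  match l.getLast? with
  | some [] => l.dropLast
  | _ => l

lemma pvAdjust_cons_of_ne_nil (x : List Char) (l : List (List Char)) (h : l ≠ []) :
    pvAdjust (x :: l) = x :: pvAdjust l := by
  unfold pvAdjust
  cases l with
  | nil => exact absurd rfl h
  | cons a t =>
    rw [List.getLast?_cons_cons]
    cases hl : (a :: t).getLast? with
    | none => simp [List.getLast?_cons] at hl
    | some v =>
      cases v with
      | nil => simp [List.dropLast_cons_of_ne_nil]
      | cons y ys => simp

-- the crux: A's segment recursion equals strip-mapped adjusted split, for any pending prefix p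
lemma pvSegs_eq (s : List Char) : ∀ (p : List Char),
    pvSegs p s = (pvAdjust ((pvMySplit s).modifyHead (p ++ ·))).map
      (fun q => String.ofList (q.dropWhile (· == ' '))) := by
  induction s with
  | nil =>
    intro p
    simp only [pvMySplit, List.modifyHead, List.append_nil, pvSegs]
    split_ifs with h
    · have hp : p ≠ [] := by intro h'; subst h'; simp at h
      have hadj : pvAdjust [p] = [p] := by
        unfold pvAdjust
        cases p with
        | nil => exact absurd rfl hp
        | cons a t => simp
      simp [hadj]
    · have hp : p = [] := by
        cases p with | nil => rfl | cons a t => simp at h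
      subst hp
      simp [pvAdjust]
  | cons c cs ih =>
    intro p
    by_cases hc : c = ':'
    · subst hc
      simp only [pvMySplit, List.modifyHead, List.append_nil, pvSegs, if_pos]
      rw [pvAdjust_cons_of_ne_nil _ _ (by
        have h := pvMySplit_ne_nil cs
        cases hms : pvMySplit cs with
        | nil => exact absurd hms h
        | cons a t => simp)]
      simp only [List.map_cons]
      have := ih []
      rw [pvModifyHead_nil] at this
      rw [this]
    · have hne := pvMySplit_ne_nil cs
      simp only [pvSegs, if_neg hc, pvMySplit, ih (p ++ [c])]
      cases hms : pvMySplit cs with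
      | nil => exact absurd hms hne
      | cons a t => simp [List.modifyHead]

-- ===== VERDICT (by name: the statement is the Claim_ definition above) =====
theorem parametri_spec : Claim_equal_parametri := by
  intro text _hdom _hpre
  unfold Spec_parametri parametri parametri_alt
  simp only [PySem.Chars.len_eq]
  set t := text.toList with ht
  set inizio : Int := ((PySem.List.pyGetD (PySem.Chars.split₀ t) 0 []).length : Int) + 1 with hiz
  have h0 : (0 : Int) ≤ inizio := by positivity
  have hhead : ((PySem.Chars.split₀ t).headD []).length = (PySem.List.pyGetD (PySem.Chars.split₀ t) 0 []).length := by
    cases PySem.Chars.split₀ t with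
    | nil => rfl
    | cons a l => simp [PySem.List.pyGetD, PySem.List.pyGet?, PySem.List.pyIdx?]
  rw [PySem.List.foldl_pyRange_pyGetD' t ' ' pvStepA ([], []) h0]
  rw [foldA_eq (t.drop inizio.toNat) [] []]
  rw [hhead]
  rw [PySem.Chars.slice_eq_listSlice, PySem.List.slice_from t h0]
  rw [splitOn_eq_pvMySplit]
  have := pvSegs_eq (t.drop inizio.toNat) []
  rw [pvModifyHead_nil] at this
  exact this
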